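-- pv_equiv track=rewrite | github.com/sukminc/hero-performance-os | app/api/field_ecology.py | _hero_position
-- ===== SOURCE A (Python) =====
-- def _hero_position(block: list[str]) -> str | None:
--     for row in block:
--         if "(button)" in row and "Hero" in row:
--             return "button"
--         if "Hero (small blind)" in row:
--             return "small blind"
--         if "Hero (big blind)" in row:
--             return "big blind"
--     for row in block:
--         if row.startswith("Seat ") and "Hero" in row:
--             if "(button)" in row:
--                 return "button"
--     return None
-- ===== SOURCE B (Python) =====
-- def _first_index(block, pred):
--     for i, row in enumerate(block):
--         if pred(row):
--             return i
--     return None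
--
--
-- def _hero_position(block):
--     candidates = (
--         (_first_index(block, lambda r: "(button)" in r and "Hero" in r), "button"),
--         (_first_index(block, lambda r: "Hero (small blind)" in r), "small blind"),
--         (_first_index(block, lambda r: "Hero (big blind)" in r), "big blind"),
--     )
--     best = None
--     for idx, label in candidates:
--         if idx is not None and (best is None or idx < best[0]):
--             best = (idx, label)
--     return best[1] if best is not None else None
-- ===== Notes on version B (the rewrite author's own statement) =====
-- stated objective: alternative
-- what changed: Instead of A's early-return row scan (plus a dead second loop), B runs one scan per marker to get the first matching index for each of the three positions, then picks the label with the smallest index, breaking ties by A's in-row priority (button, small blind, big blind).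
import Mathlib
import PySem

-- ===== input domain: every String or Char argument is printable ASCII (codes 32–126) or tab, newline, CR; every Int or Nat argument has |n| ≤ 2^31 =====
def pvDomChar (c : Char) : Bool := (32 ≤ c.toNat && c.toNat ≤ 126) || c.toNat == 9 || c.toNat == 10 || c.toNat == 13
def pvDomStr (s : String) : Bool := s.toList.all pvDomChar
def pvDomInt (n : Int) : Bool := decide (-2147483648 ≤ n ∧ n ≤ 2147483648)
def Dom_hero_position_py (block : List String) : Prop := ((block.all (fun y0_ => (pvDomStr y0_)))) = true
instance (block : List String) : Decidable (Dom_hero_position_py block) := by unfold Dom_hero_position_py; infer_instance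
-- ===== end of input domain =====

-- B replaces A's early-return row scan (whose second loop is dead code) by three per-marker
-- first-index scans followed by an index-minimum selection with A's in-row priority; objective: alternative.


-- ===== PORT A =====
-- first loop of A
def heroLoop1 : List String → Option String
  | [] => none
  | row :: rest =>
    if PySem.Str.isIn "(button)" row && PySem.Str.isIn "Hero" row then some "button"
    else if PySem.Str.isIn "Hero (small blind)" row then some "small blind"
    else if PySem.Str.isIn "Hero (big blind)" row then some "big blind"
    else heroLoop1 rest

-- second loop of A
def heroLoop2 : List String → Option String
  | [] => none
  | row :: rest =>
    if PySem.Str.startswith row "Seat " && PySem.Str.isIn "Hero" row then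
      if PySem.Str.isIn "(button)" row then some "button" else heroLoop2 rest
    else heroLoop2 rest

def hero_position_py (block : List String) : Option String :=
  match heroLoop1 block with
  | some r => some r
  | none => heroLoop2 block

-- ===== PORT B =====
-- Source B's _first_index: index of the first row satisfying pred
def firstIdx (pred : String → Bool) : List String → Option Nat
  | [] => none
  | row :: rest => if pred row then some 0 else (firstIdx pred rest).map (· + 1)

-- Source B's selection loop: keep (index, label) with strictly smaller index (ties keep the earlier-listed label)
def pickBest (cands : List (Option Nat × String)) : Option (Nat × String) :=
  cands.foldl
    (fun best c =>
      match c.1 with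
      | none => best
      | some i =>
        match best with
        | none => some (i, c.2)
        | some (j, _) => if i < j then some (i, c.2) else best)
    none

def hero_position_py_alt (block : List String) : Option String :=
  let b := firstIdx (fun r => PySem.Str.isIn "(button)" r && PySem.Str.isIn "Hero" r) block
  let s := firstIdx (fun r => PySem.Str.isIn "Hero (small blind)" r) block
  let g := firstIdx (fun r => PySem.Str.isIn "Hero (big blind)" r) block
  (pickBest [(b, "button"), (s, "small blind"), (g, "big blind")]).map (·.2)

-- ===== PRECONDITION & SPEC =====
def Spec_hero_position_py (block : List String) (out : Option String) : Prop := out = hero_position_py_alt block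
instance (block : List String) (out : Option String) : Decidable (Spec_hero_position_py block out) := by unfold Spec_hero_position_py; infer_instance

-- ===== CLAIM =====
def Claim_equal_hero_position_py : Prop := ∀ (block : List String), Dom_hero_position_py block → Spec_hero_position_py block (hero_position_py block)

-- ===== LEMMAS AND PROOFS =====
-- selecting among three candidates is invariant under shifting every index by one
theorem pickBest_shift (b s g : Option Nat) (lb ls lg : String) :
    (pickBest [(b.map (· + 1), lb), (s.map (· + 1), ls), (g.map (· + 1), lg)]).map (·.2)
      = (pickBest [(b, lb), (s, ls), (g, lg)]).map (·.2) := by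
  cases b with
  | none => cases s with
    | none => cases g <;> simp [pickBest]
    | some j => cases g with
      | none => simp [pickBest]
      | some k => by_cases h : k < j <;> simp [pickBest, h, Nat.add_lt_add_iff_right]
  | some i => cases s with
    | none => cases g with
      | none => simp [pickBest]
      | some k => by_cases h : k < i <;> simp [pickBest, h, Nat.add_lt_add_iff_right]
    | some j =>
      by_cases h1 : j < i
      · cases g with
        | none => simp [pickBest, h1, Nat.add_lt_add_iff_right]
        | some k => by_cases h2 : k < j <;> simp [pickBest, h1, h2, Nat.add_lt_add_iff_right]
      · cases g with
        | none => simp [pickBest, h1, Nat.add_lt_add_iff_right]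
        | some k => by_cases h2 : k < i <;> simp [pickBest, h1, h2, Nat.add_lt_add_iff_right]

theorem pickBest_fst_zero (s g : Option Nat) (lb ls lg : String) :
    (pickBest [(some 0, lb), (s, ls), (g, lg)]).map (·.2) = some lb := by
  cases s <;> cases g <;> simp [pickBest]

theorem pickBest_snd_zero (b g : Option Nat) (lb ls lg : String) :
    (pickBest [(b.map (· + 1), lb), (some 0, ls), (g, lg)]).map (·.2) = some ls := by
  cases b <;> cases g <;> simp [pickBest]

theorem pickBest_thd_zero (b s : Option Nat) (lb ls lg : String) :
    (pickBest [(b.map (· + 1), lb), (s.map (· + 1), ls), (some 0, lg)]).map (·.2) = some lg := by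
  cases b with
  | none => cases s <;> simp [pickBest]
  | some i => cases s with
    | none => simp [pickBest]
    | some j => by_cases h : j < i <;> simp [pickBest, h, Nat.add_lt_add_iff_right]

theorem heroLoop1_eq_alt (block : List String) :
    heroLoop1 block = hero_position_py_alt block := by
  induction block with
  | nil => rfl
  | cons row rest ih =>
    by_cases h1 : (PySem.Str.isIn "(button)" row && PySem.Str.isIn "Hero" row) = true
    · simp only [heroLoop1, hero_position_py_alt, firstIdx, if_pos h1]
      exact (pickBest_fst_zero _ _ _ _ _).symm
    · by_cases h2 : PySem.Str.isIn "Hero (small blind)" row = true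
      · simp only [heroLoop1, hero_position_py_alt, firstIdx, if_neg h1, if_pos h2]
        exact (pickBest_snd_zero _ _ _ _ _).symm
      · by_cases h3 : PySem.Str.isIn "Hero (big blind)" row = true
        · simp only [heroLoop1, hero_position_py_alt, firstIdx, if_neg h1, if_neg h2, if_pos h3]
          exact (pickBest_thd_zero _ _ _ _ _).symm
        · simp only [heroLoop1, hero_position_py_alt, firstIdx, if_neg h1, if_neg h2, if_neg h3]
          rw [pickBest_shift]
          exact ih

theorem heroLoop2_none_of_loop1_none (block : List String)
    (h : heroLoop1 block = none) : heroLoop2 block = none := by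
  induction block with
  | nil => rfl
  | cons row rest ih =>
    simp only [heroLoop1] at h
    simp only [heroLoop2]
    split_ifs at h with hb h1 h2
    split_ifs with hs hbtn
    · exact absurd (Bool.and_eq_true_iff.mpr ⟨hbtn, (Bool.and_eq_true_iff.mp hs).2⟩) hb
    · exact ih h
    · exact ih h

-- ===== VERDICT =====
theorem hero_position_py_spec : Claim_equal_hero_position_py := by
  intro block _
  unfold Spec_hero_position_py hero_position_py
  rcases h : heroLoop1 block with _ | r
  · rw [heroLoop2_none_of_loop1_none block h, ← heroLoop1_eq_alt, h]
  · rw [← heroLoop1_eq_alt, h]
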